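-- pv_equiv track=rewrite | github.com/matthewdiamant/advent-of-code-2020 | day-14/day-14.py | create_instruction_groups
-- ===== SOURCE A (Python) =====
-- def create_instruction_groups(input):
--     instruction_groups = []
--     instruction_group = []
--     for instruction in input:
--         if instruction[0:4] == "mask":
--             instruction_groups.append(instruction_group)
--             instruction_group = []
--         instruction_group.append(instruction)
--     instruction_groups.append(instruction_group)
--     return instruction_groups[1:]
-- ===== SOURCE B (Python) =====
-- def create_instruction_groups(input):
--     lines = list(input)
--     mask_idx = [i for i, line in enumerate(lines) if line[0:4] == "mask"]
--     ends = mask_idx[1:] + [len(lines)]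
--     return [lines[a:b] for a, b in zip(mask_idx, ends)]
-- ===== Notes on version B (the rewrite author's own statement) =====
-- stated objective: alternative
-- what changed: Replaces A's single accumulating pass with append-and-reset and a sentinel first group dropped by [1:] by a two-phase plan: collect the indices of all 'mask' lines, then emit one slice of the input between each consecutive pair of mask indices (the last slice running to the end).
import Mathlib
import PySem

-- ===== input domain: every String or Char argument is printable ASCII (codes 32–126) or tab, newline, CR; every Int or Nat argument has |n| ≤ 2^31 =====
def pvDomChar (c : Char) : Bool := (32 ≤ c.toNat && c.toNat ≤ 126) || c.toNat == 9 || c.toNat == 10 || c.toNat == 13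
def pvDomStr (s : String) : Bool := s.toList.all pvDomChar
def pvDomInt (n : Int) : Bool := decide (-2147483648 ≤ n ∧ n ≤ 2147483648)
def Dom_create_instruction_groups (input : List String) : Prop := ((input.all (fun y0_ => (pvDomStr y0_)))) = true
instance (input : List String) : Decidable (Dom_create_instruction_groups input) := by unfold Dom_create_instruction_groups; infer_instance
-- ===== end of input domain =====

-- B groups by collecting mask-line indices and slicing between consecutive ones, instead of A's accumulate-and-reset pass; alternative decomposition, same cost.

-- instruction[0:4] == "mask" (shared literal helper of both ports)
def pvIsMask (s : String) : Bool := PySem.Str.slice s (some 0) (some 4) == "mask"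

-- ===== PORT A =====
def create_instruction_groups (input : List String) : List (List String) :=
  let st := input.foldl
    (fun (st : List (List String) × List String) instruction =>
      let st2 := if pvIsMask instruction then (st.1 ++ [st.2], ([] : List String)) else st
      (st2.1, st2.2 ++ [instruction]))
    (([] : List (List String)), ([] : List String))
  PySem.List.slice (st.1 ++ [st.2]) (some 1) none

-- ===== PORT B =====
def create_instruction_groups_alt (input : List String) : List (List String) :=
  let lines := input
  let maskIdx : List Int :=
    ((PySem.List.enumerate lines).filter (fun p => pvIsMask p.2)).map (fun p => p.1)
  let ends : List Int := maskIdx.drop 1 ++ [(lines.length : Int)]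
  (maskIdx.zip ends).map (fun p => PySem.List.slice lines (some p.1) (some p.2))

-- ===== PRECONDITION & SPEC =====
def Spec_create_instruction_groups (input : List String) (out : List (List String)) : Prop := out = create_instruction_groups_alt input
instance (input : List String) (out : List (List String)) : Decidable (Spec_create_instruction_groups input out) := by unfold Spec_create_instruction_groups; infer_instance

-- ===== CLAIM (what is proved, stated in full; the proofs are below) =====
def Claim_equal_create_instruction_groups : Prop := ∀ (input : List String), Dom_create_instruction_groups input → Spec_create_instruction_groups input (create_instruction_groups input)

-- ===== LEMMAS AND PROOFS =====

-- recursive characterisation both ports are reduced to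
def pvChop : List String → List (List String)
  | [] => []
  | x :: xs =>
    if pvIsMask x then
      (x :: xs.takeWhile (fun s => !pvIsMask s)) :: pvChop (xs.dropWhile (fun s => !pvIsMask s))
    else pvChop xs
termination_by l => l.length
decreasing_by
  · simpa using Nat.lt_succ_of_le (xs.length_dropWhile_le _)
  · simp

theorem pvChop_cons_mask (x : String) (xs : List String) (hx : pvIsMask x = true) :
    pvChop (x :: xs) =
      (x :: xs.takeWhile (fun s => !pvIsMask s)) :: pvChop (xs.dropWhile (fun s => !pvIsMask s)) := by
  rw [pvChop]; simp [hx]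

theorem pvChop_cons_nonmask (x : String) (xs : List String) (hx : pvIsMask x = false) :
    pvChop (x :: xs) = pvChop xs := by
  rw [pvChop]; simp [hx]

theorem pvChop_dropWhile (xs : List String) :
    pvChop (xs.dropWhile (fun s => !pvIsMask s)) = pvChop xs := by
  induction xs with
  | nil => rfl
  | cons x xs ih =>
    cases hx : pvIsMask x with
    | true => simp [List.dropWhile_cons, hx]
    | false =>
      rw [List.dropWhile_cons]
      simp only [hx, Bool.not_false, if_pos]
      rw [ih, pvChop_cons_nonmask x xs hx]

-- A-side: loop invariant
theorem pvFoldA (xs : List String) (groups : List (List String)) (cur : List String) :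
    (let r := xs.foldl
      (fun (st : List (List String) × List String) instruction =>
        let st2 := if pvIsMask instruction then (st.1 ++ [st.2], ([] : List String)) else st
        (st2.1, st2.2 ++ [instruction])) (groups, cur)
     r.1 ++ [r.2]) =
    groups ++ (cur ++ xs.takeWhile (fun s => !pvIsMask s)) ::
      pvChop (xs.dropWhile (fun s => !pvIsMask s)) := by
  induction xs generalizing groups cur with
  | nil => simp [pvChop]
  | cons x xs ih =>
    cases hx : pvIsMask x with
    | true =>
      simp only [List.foldl_cons, hx, if_pos, List.takeWhile_cons, List.dropWhile_cons]
      rw [ih]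
      simp only [hx, Bool.not_true, Bool.false_eq_true, if_false]
      rw [pvChop_cons_mask x xs hx]
      simp
    | false =>
      simp only [List.foldl_cons, hx, Bool.false_eq_true, if_false, List.takeWhile_cons,
        List.dropWhile_cons]
      rw [ih]
      simp [hx]

-- B-side: Nat-indexed versions of the two phases
def pvNatMI : List String → List Nat
  | [] => []
  | x :: xs => (if pvIsMask x then [0] else []) ++ (pvNatMI xs).map (· + 1)

def pvGN (lines : List String) (mi : List Nat) : List (List String) :=
  (mi.zip (mi.drop 1 ++ [lines.length])).map (fun p => (lines.drop p.1).take (p.2 - p.1))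

theorem pvNatMI_nil_all (xs : List String) (h : pvNatMI xs = []) :
    ∀ s ∈ xs, ¬ pvIsMask s = true := by
  induction xs with
  | nil => simp
  | cons x xs ih =>
    rw [pvNatMI] at h
    cases hx : pvIsMask x with
    | true => rw [hx] at h; simp at h
    | false =>
      rw [hx] at h
      simp only [Bool.false_eq_true, if_false, List.nil_append, List.map_eq_nil_iff] at h
      intro s hs
      rcases List.mem_cons.1 hs with rfl | hs
      · simp [hx]
      · exact ih h s hs

theorem pvNatMI_head_take (xs : List String) (k : Nat) (rest : List Nat)
    (h : pvNatMI xs = k :: rest) :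
    xs.take k = xs.takeWhile (fun s => !pvIsMask s) := by
  induction xs generalizing k rest with
  | nil => simp [pvNatMI] at h
  | cons x xs ih =>
    rw [pvNatMI] at h
    cases hx : pvIsMask x with
    | true =>
      rw [hx] at h
      simp only [if_pos, List.singleton_append, List.cons.injEq] at h
      simp [List.takeWhile_cons, hx, h.1]
    | false =>
      rw [hx] at h
      simp only [Bool.false_eq_true, if_false, List.nil_append] at h
      cases hmi : pvNatMI xs with
      | nil => rw [hmi] at h; simp at h
      | cons k' rest' =>
        rw [hmi] at h
        simp only [List.map_cons, List.cons.injEq] at h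
        obtain ⟨rfl, -⟩ := h
        simp [List.takeWhile_cons, hx, ih k' rest' hmi]

-- shift lemma: slicing x::xs at indices all shifted by one is slicing xs
theorem pvShift (x : String) (xs : List String) (mi l : List Nat) (n : Nat) :
    ((mi.map (· + 1)).zip ((l.map (· + 1)) ++ [n + 1])).map
        (fun p => ((x :: xs).drop p.1).take (p.2 - p.1)) =
    (mi.zip (l ++ [n])).map (fun p => (xs.drop p.1).take (p.2 - p.1)) := by
  induction mi generalizing l with
  | nil => simp
  | cons a as ih =>
    cases l with
    | nil => simpa using ih []
    | cons b bs => simpa using ih bs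

theorem pvGN_eq_chop (lines : List String) : pvGN lines (pvNatMI lines) = pvChop lines := by
  induction lines with
  | nil => simp [pvGN, pvNatMI, pvChop]
  | cons x xs ih =>
    cases hx : pvIsMask x with
    | true =>
      rw [pvNatMI, hx, if_pos rfl, List.singleton_append, pvChop_cons_mask x xs hx]
      cases hmi : pvNatMI xs with
      | nil =>
        have hall := pvNatMI_nil_all xs hmi
        have htw : xs.takeWhile (fun s => !pvIsMask s) = xs := by
          rw [List.takeWhile_eq_self_iff]
          intro s hs; simpa using hall s hs
        have hdw : xs.dropWhile (fun s => !pvIsMask s) = [] := by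
          rw [List.dropWhile_eq_nil_iff]
          intro s hs; simpa using hall s hs
        rw [htw, hdw]
        simp [pvGN, pvChop, List.take_of_length_le]
      | cons k rest =>
        have h2 : ((k :: rest).zip (rest ++ [xs.length])).map
            (fun p => (xs.drop p.1).take (p.2 - p.1)) = pvChop xs := by
          have h3 := ih
          rw [hmi] at h3
          simpa [pvGN] using h3
        have hrest := (pvShift x xs (k :: rest) rest xs.length).trans h2
        simp only [List.map_cons] at hrest
        rw [pvGN]
        simp only [List.map_cons, List.drop_succ_cons, List.drop_zero, List.cons_append,
          List.zip_cons_cons, List.map_cons, List.length_cons]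
        refine List.cons_eq_cons.2 ⟨?_, ?_⟩
        · have htake := pvNatMI_head_take xs k rest hmi
          simp [List.take_succ_cons, ← htake]
        · rw [pvChop_dropWhile xs, ← hrest]
    | false =>
      rw [pvNatMI, hx, pvChop_cons_nonmask x xs hx]
      simp only [Bool.false_eq_true, if_false, List.nil_append]
      rw [← ih, pvGN, pvGN, ← List.map_drop, List.length_cons, pvShift]

-- the enumerate/filter/map phase computes pvNatMI (with offset s)
theorem pvMI_eq (lines : List String) (s : Int) :
    ((PySem.List.enumerate lines s).filter (fun p => pvIsMask p.2)).map (fun p => p.1) =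
    (pvNatMI lines).map (fun (k : Nat) => s + (k : Int)) := by
  induction lines generalizing s with
  | nil => simp [PySem.List.enumerate_nil, pvNatMI]
  | cons x xs ih =>
    rw [PySem.List.enumerate_cons, pvNatMI]
    cases hx : pvIsMask x with
    | true =>
      rw [List.filter_cons, if_pos (by simpa using hx), if_pos rfl,
        List.singleton_append, List.map_cons, List.map_cons, ih (s + 1), List.map_map]
      refine List.cons_eq_cons.2 ⟨by simp, ?_⟩
      apply List.map_congr_left; intro k _; simp only [Function.comp_apply]; push_cast; ring
    | false =>
      rw [List.filter_cons, if_neg (by simp [hx])]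
      simp only [Bool.false_eq_true, if_false, List.nil_append]
      rw [ih (s + 1), List.map_map]
      apply List.map_congr_left; intro k _; simp only [Function.comp_apply]; push_cast; ring

theorem pvAltEqChop (input : List String) : create_instruction_groups_alt input = pvChop input := by
  rw [show create_instruction_groups_alt input =
      ((((PySem.List.enumerate input).filter (fun p => pvIsMask p.2)).map (fun p => p.1)).zip
        ((((PySem.List.enumerate input).filter (fun p => pvIsMask p.2)).map (fun p => p.1)).drop 1
          ++ [(input.length : Int)])).map
        (fun p => PySem.List.slice input (some p.1) (some p.2)) from rfl]
  rw [pvMI_eq input 0]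
  rw [show (pvNatMI input).map (fun (k : Nat) => (0 : Int) + (k : Int)) =
      (pvNatMI input).map (fun (k : Nat) => (k : Int)) from
    List.map_congr_left (fun k _ => by ring)]
  rw [← pvGN_eq_chop, pvGN, ← List.map_drop]
  rw [show ((pvNatMI input).drop 1).map (fun (k : Nat) => (k : Int)) ++ [(input.length : Int)] =
      (((pvNatMI input).drop 1) ++ [input.length]).map (fun (k : Nat) => (k : Int)) by simp]
  rw [List.zip_map, List.map_map]
  apply List.map_congr_left
  intro p _
  cases p with
  | mk a b => simp [Prod.map, PySem.List.slice_natCast]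

theorem pvAEqChop (input : List String) : create_instruction_groups input = pvChop input := by
  have h := pvFoldA input [] []
  simp only [List.nil_append] at h
  rw [show create_instruction_groups input =
      PySem.List.slice
        ((input.foldl
          (fun (st : List (List String) × List String) instruction =>
            let st2 := if pvIsMask instruction then (st.1 ++ [st.2], ([] : List String)) else st
            (st2.1, st2.2 ++ [instruction])) ([], [])).1 ++
         [(input.foldl
          (fun (st : List (List String) × List String) instruction =>
            let st2 := if pvIsMask instruction then (st.1 ++ [st.2], ([] : List String)) else st
            (st2.1, st2.2 ++ [instruction])) ([], [])).2]) (some 1) none from rfl]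
  rw [PySem.List.slice_from_one, h]
  simp [pvChop_dropWhile]

-- ===== VERDICT (by name: the statement is the Claim_ definition above) =====
theorem create_instruction_groups_spec : Claim_equal_create_instruction_groups := by
  intro input _
  unfold Spec_create_instruction_groups
  rw [pvAEqChop, pvAltEqChop]
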